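-- pv_equiv track=rewrite | github.com/jarkynai-st/winx_club | files/task6.py | backpack
-- ===== SOURCE A (Python) =====
-- def backpack (items_list:list):
--     i = 0
--     list2 = []
--     while i < len(items_list):
--         item_count = items_list.count(items_list[i])
--         list2.append(item_count)
--         i += 1
--     max_list = max(list2)
--     result_etem = items_list[list2.index(max_list)]
--
--     j = 0
--     while j < max_list-1:
--         items_list.remove(result_etem)
--         j += 1
--     return items_list
-- ===== SOURCE B (Python) =====
-- def backpack(items_list: list):
--     # one-pass count table, then a single filtering pass that skips all but
--     # the last occurrence of the most frequent element (first-max tie-break)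
--     counts = {}
--     for x in items_list:
--         counts[x] = counts.get(x, 0) + 1
--     result_etem = max(items_list, key=counts.get)
--     remaining = counts.get(result_etem, 0)
--     kept = []
--     for x in items_list:
--         if x == result_etem and remaining > 1:
--             remaining -= 1
--         else:
--             kept.append(x)
--     items_list[:] = kept
--     return items_list
-- ===== Notes on version B (the rewrite author's own statement) =====
-- stated objective: faster
-- what changed: Replaces A's per-element .count scan, list2.index and repeated .remove calls by a single dict counting pass, a max-with-key, and one filtering pass that skips all but the last occurrence of the most frequent element (same in-place mutation of the argument).
import Mathlib
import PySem

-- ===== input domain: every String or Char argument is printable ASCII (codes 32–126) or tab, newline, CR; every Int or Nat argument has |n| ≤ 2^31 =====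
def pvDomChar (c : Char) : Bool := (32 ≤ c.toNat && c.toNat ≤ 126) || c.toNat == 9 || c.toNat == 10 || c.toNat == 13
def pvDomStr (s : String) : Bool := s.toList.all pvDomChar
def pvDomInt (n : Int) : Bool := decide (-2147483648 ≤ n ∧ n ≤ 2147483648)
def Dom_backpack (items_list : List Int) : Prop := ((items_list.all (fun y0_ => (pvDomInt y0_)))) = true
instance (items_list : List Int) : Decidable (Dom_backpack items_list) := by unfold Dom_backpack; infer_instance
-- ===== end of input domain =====

-- B replaces A's quadratic count/index/repeated-remove passes by one dict counting pass,
-- a max-with-key and one filtering pass; both versions mutate the argument list in place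
-- to the same final state, and the theorems below are about the returned value.

-- ===== PORT A =====
-- while i < len: list2.append(items_list.count(items_list[i])); i += 1
def backpackCountsLoop (l : List Int) (i : Nat) (list2 : List Int) : List Int :=
  if h : i < l.length then
    backpackCountsLoop l (i + 1) (list2 ++ [(PySem.List.count l l[i] : Int)])
  else list2
  termination_by l.length - i

-- while j < max_list-1: items_list.remove(result_etem); j += 1  (runs (max_list-1) times)
def backpackRemoveLoop (e : Int) : Nat → List Int → Option (List Int)
  | 0, l => some l
  | n + 1, l => (PySem.List.remove? l e).bind (backpackRemoveLoop e n)

def backpack (items_list : List Int) : List Int :=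
  let list2 := backpackCountsLoop items_list 0 []
  match PySem.List.max? list2 (fun y => y) with
  | none => []  -- Python: max([]) raises ValueError; excluded by Pre_
  | some max_list =>
    match PySem.List.index? list2 max_list with
    | none => []  -- unreachable: max_list ∈ list2
    | some idx =>
      match PySem.List.pyGet? items_list (idx : Int) with
      | none => []  -- unreachable: idx < len
      | some result_etem =>
        match backpackRemoveLoop result_etem (max_list - 1).toNat items_list with
        | none => []  -- Python: remove on absent value raises; unreachable here
        | some r => r

-- ===== PORT B =====
def backpack_alt (items_list : List Int) : List Int :=
  let counts := items_list.foldl (fun d x => d.insert x (d.getD x 0 + 1))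
    (PySem.Dict.empty : PySem.Dict Int Int)
  match PySem.List.max? items_list (fun x => counts.getD x 0) with
  | none => []  -- Python: max([]) raises ValueError; excluded by Pre_
  | some result_etem =>
    let remaining := counts.getD result_etem 0
    (items_list.foldl
      (fun (kr : List Int × Int) x =>
        if x == result_etem && kr.2 > 1 then (kr.1, kr.2 - 1) else (kr.1 ++ [x], kr.2))
      (([] : List Int), remaining)).1

-- ===== PRECONDITION & SPEC =====
-- Pre_ excludes only the empty list, on which Python A raises ValueError (max of empty sequence).
def Pre_backpack (items_list : List Int) : Prop := items_list ≠ []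
instance (items_list : List Int) : Decidable (Pre_backpack items_list) := by
  unfold Pre_backpack; infer_instance
def pvWitness_backpack : List Int := [1, 2, 2, 3, 2]

def Spec_backpack (items_list : List Int) (out : List Int) : Prop := out = backpack_alt items_list
instance (items_list : List Int) (out : List Int) : Decidable (Spec_backpack items_list out) := by
  unfold Spec_backpack; infer_instance

-- ===== CLAIM (what is proved, stated in full; the proofs are below) =====
def Claim_equal_backpack : Prop := ∀ (items_list : List Int), Dom_backpack items_list →
  Pre_backpack items_list → Spec_backpack items_list (backpack items_list)

-- ===== LEMMAS AND PROOFS =====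

-- "first element achieving the maximal key value" (strictly larger than all before it)
def FirstMax (f : Int → Int) (xs : List Int) (e : Int) : Prop :=
  (∀ y ∈ xs, f y ≤ f e) ∧ ∃ pre suf, xs = pre ++ e :: suf ∧ ∀ y ∈ pre, f y < f e

theorem firstMax_uniq_aux (f : Int → Int) :
    ∀ (pre1 pre2 suf1 suf2 : List Int) (e1 e2 : Int),
    pre1 ++ e1 :: suf1 = pre2 ++ e2 :: suf2 →
    (∀ y ∈ pre1, f y < f e1) → (∀ y ∈ pre2, f y < f e2) →
    f e1 = f e2 → e1 = e2 := by
  intro pre1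
  induction pre1 with
  | nil =>
    intro pre2 suf1 suf2 e1 e2 hx h1 h2 hf
    cases pre2 with
    | nil =>
      simp only [List.nil_append, List.cons.injEq] at hx
      exact hx.1
    | cons b t =>
      simp only [List.nil_append, List.cons_append, List.cons.injEq] at hx
      have hb : f b < f e2 := h2 b (by simp)
      rw [hx.1] at hf
      omega
  | cons a t ih =>
    intro pre2 suf1 suf2 e1 e2 hx h1 h2 hf
    cases pre2 with
    | nil =>
      simp only [List.cons_append, List.nil_append, List.cons.injEq] at hx
      have ha : f a < f e1 := h1 a (by simp)
      rw [← hx.1] at hf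
      omega
    | cons b t2 =>
      simp only [List.cons_append, List.cons.injEq] at hx
      exact ih t2 suf1 suf2 e1 e2 hx.2 (fun y hy => h1 y (by simp [hy]))
        (fun y hy => h2 y (by simp [hy])) hf

theorem firstMax_unique' {f : Int → Int} {xs : List Int} {e1 e2 : Int}
    (h1 : FirstMax f xs e1) (h2 : FirstMax f xs e2) : e1 = e2 := by
  obtain ⟨hm1, pre1, suf1, hx1, hp1⟩ := h1
  obtain ⟨hm2, pre2, suf2, hx2, hp2⟩ := h2
  have he1 : e1 ∈ xs := hx1 ▸ (by simp)
  have he2 : e2 ∈ xs := hx2 ▸ (by simp)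
  exact firstMax_uniq_aux f pre1 pre2 suf1 suf2 e1 e2 (hx1 ▸ hx2)
    hp1 hp2 (le_antisymm (hm2 e1 he1) (hm1 e2 he2))

-- max? returns the FIRST extremal element
def maxStep (f : Int → Int) (acc : Option Int) (x : Int) : Option Int :=
  match acc with
  | none => some x
  | some m => if f m < f x then some x else some m

theorem max?_cons_foldl (f : Int → Int) :
    ∀ (t : List Int) (x : Int),
    PySem.List.max? (x :: t) f = t.foldl (maxStep f) (some x) := by
  intro t
  induction t with
  | nil => intro x; rfl
  | cons y t ih =>
    intro x
    by_cases h : f x < f y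
    · have l1 : PySem.List.max? (x :: y :: t) f = PySem.List.max? (y :: t) f := by
        simp only [PySem.List.max?, List.foldl_cons]
        rw [if_pos h]
      rw [l1, ih y]
      simp [List.foldl_cons, maxStep, if_pos h]
    · have l1 : PySem.List.max? (x :: y :: t) f = PySem.List.max? (x :: t) f := by
        simp only [PySem.List.max?, List.foldl_cons]
        rw [if_neg h]
      rw [l1, ih x]
      simp [List.foldl_cons, maxStep, if_neg h]

theorem max?_foldl_aux (f : Int → Int) :
    ∀ (xs : List Int) (c m : Int),
    xs.foldl (maxStep f) (some c) = some m →
    (m = c ∧ ∀ y ∈ xs, f y ≤ f c) ∨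
    (∃ pre suf, xs = pre ++ m :: suf ∧ f c < f m ∧ ∀ y ∈ pre, f y < f m) := by
  intro xs
  induction xs with
  | nil => intro c m h; left; simp at h; simp [h]
  | cons x t ih =>
    intro c m h
    simp only [List.foldl_cons, maxStep] at h
    by_cases hc : f c < f x
    · rw [if_pos hc] at h
      rcases ih x m h with ⟨rfl, hall⟩ | ⟨pre, suf, rfl, hlt, hpre⟩
      · right; exact ⟨[], t, rfl, hc, by simp⟩
      · right
        refine ⟨x :: pre, suf, rfl, lt_trans hc hlt, ?_⟩
        intro y hy
        rcases List.mem_cons.mp hy with rfl | hy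
        · exact hlt
        · exact hpre y hy
    · rw [if_neg hc] at h
      rcases ih c m h with ⟨rfl, hall⟩ | ⟨pre, suf, rfl, hlt, hpre⟩
      · left
        refine ⟨rfl, ?_⟩
        intro y hy
        rcases List.mem_cons.mp hy with rfl | hy
        · omega
        · exact hall y hy
      · right
        refine ⟨x :: pre, suf, rfl, hlt, ?_⟩
        intro y hy
        rcases List.mem_cons.mp hy with rfl | hy
        · omega
        · exact hpre y hy

theorem max?_firstMax {f : Int → Int} {xs : List Int} {m : Int}
    (h : PySem.List.max? xs f = some m) : FirstMax f xs m := by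
  refine ⟨PySem.List.max?_isMax h, ?_⟩
  cases xs with
  | nil => simp [PySem.List.max?] at h
  | cons x t =>
    have h' : t.foldl (maxStep f) (some x) = some m := by
      rw [← max?_cons_foldl f t x]
      exact h
    rcases max?_foldl_aux f t x m h' with ⟨rfl, _⟩ | ⟨pre, suf, rfl, hxm, hpre⟩
    · exact ⟨[], t, rfl, by simp⟩
    · refine ⟨x :: pre, suf, rfl, ?_⟩
      intro y hy
      rcases List.mem_cons.mp hy with rfl | hy
      · exact hxm
      · exact hpre y hy

-- A's counts loop computes map of counts
theorem backpackCountsLoop_eq (l : List Int) :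
    ∀ (i : Nat) (acc : List Int),
    backpackCountsLoop l i acc = acc ++ (l.drop i).map (fun x => (l.count x : Int)) := by
  intro i
  induction hn : l.length - i using Nat.strong_induction_on generalizing i with
  | _ n ih =>
    intro acc
    rw [backpackCountsLoop]
    by_cases h : i < l.length
    · rw [dif_pos h]
      rw [ih (l.length - (i + 1)) (by omega) (i + 1) rfl]
      conv_rhs => rw [List.drop_eq_getElem_cons h]
      simp
      have h' : i < (List.map (fun x => ((l.count x : Nat) : Int)) l).length := by
        simpa using h
      rw [List.drop_eq_getElem_cons h']
      simp
    · rw [dif_neg h]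
      rw [List.drop_eq_nil_of_le (by omega)]
      simp

-- the pure form of B's filtering loop
def bLoop (e : Int) : List Int → Int → List Int
  | [], _ => []
  | x :: t, r => if x = e ∧ r > 1 then bLoop e t (r - 1) else x :: bLoop e t r

theorem bLoop_of_not_mem {e : Int} : ∀ {t : List Int} (r : Int), e ∉ t → bLoop e t r = t := by
  intro t
  induction t with
  | nil => intro r _; rfl
  | cons x t ih =>
    intro r hne
    have hx : ¬(x = e ∧ r > 1) := fun ⟨hxe, _⟩ => hne (by simp [hxe.symm])
    rw [bLoop, if_neg hx, ih r (fun h => hne (List.mem_cons_of_mem _ h))]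

theorem b_foldl_eq (e : Int) :
    ∀ (l : List Int) (acc : List Int) (r : Int),
    (l.foldl (fun (kr : List Int × Int) x =>
        if x == e && kr.2 > 1 then (kr.1, kr.2 - 1) else (kr.1 ++ [x], kr.2)) (acc, r)).1
      = acc ++ bLoop e l r := by
  intro l
  induction l with
  | nil => intro acc r; simp [bLoop]
  | cons x t ih =>
    intro acc r
    rw [List.foldl_cons, bLoop]
    by_cases h : x = e ∧ r > 1
    · have hb : (x == e && decide (r > 1)) = true := by
        simp [h.1, h.2]
      rw [if_pos hb, if_pos h]
      exact ih acc (r - 1)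
    · have hb : ¬((x == e && decide (r > 1)) = true) := by
        simp only [Bool.and_eq_true, beq_iff_eq, decide_eq_true_eq]
        exact h
      rw [if_neg hb, if_neg h]
      rw [ih (acc ++ [x]) r]
      simp

theorem removeLoop_cons_of_ne {x e : Int} (hx : x ≠ e) :
    ∀ (n : Nat) (l : List Int),
    backpackRemoveLoop e n (x :: l) = (backpackRemoveLoop e n l).map (x :: ·) := by
  intro n
  induction n with
  | zero => intro l; rfl
  | succ n ih =>
    intro l
    rw [backpackRemoveLoop, backpackRemoveLoop, PySem.List.remove?_cons_of_ne l hx]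
    cases PySem.List.remove? l e with
    | none => rfl
    | some l' => exact ih l'

-- central lemma: removing (count-1) first occurrences = keeping only the last one
theorem removeLoop_eq_bLoop (e : Int) :
    ∀ (xs : List Int) (c : Int), e ∈ xs → c = (xs.count e : Int) →
    backpackRemoveLoop e (c - 1).toNat xs = some (bLoop e xs c) := by
  intro xs
  induction xs with
  | nil => intro c h; exact absurd h (List.not_mem_nil)
  | cons x t ih =>
    intro c hmem hc
    by_cases hx : x = e
    · subst hx
      rw [List.count_cons_self] at hc
      by_cases h0 : t.count x = 0
      · have hc1 : c = 1 := by omega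
        subst hc1
        have hnt : x ∉ t := List.count_eq_zero.mp h0
        simp only [show ((1 : Int) - 1).toNat = 0 from rfl, backpackRemoveLoop]
        rw [bLoop, if_neg (by omega), bLoop_of_not_mem 1 hnt]
      · have h1 : 1 ≤ t.count x := by omega
        have hmt : x ∈ t := by
          by_contra hn
          exact h0 (List.count_eq_zero.mpr hn)
        have hn : (c - 1).toNat = (t.count x - 1) + 1 := by omega
        rw [hn, backpackRemoveLoop, PySem.List.remove?_cons_self, Option.bind_some]
        have := ih (t.count x : Int) hmt rfl
        rw [show ((t.count x : Int) - 1).toNat = t.count x - 1 by omega] at this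
        rw [this, bLoop, if_pos ⟨rfl, by omega⟩]
        rw [show c - 1 = (t.count x : Int) from by omega]
    · have hmt : e ∈ t := by
        rcases List.mem_cons.mp hmem with h | h
        · exact absurd h (fun hh => hx hh.symm)
        · exact h
      rw [List.count_cons_of_ne hx] at hc
      rw [removeLoop_cons_of_ne hx, ih c hmt hc, bLoop, if_neg (fun h => hx h.1)]
      rfl

theorem main_eq (l : List Int) (h : l ≠ []) : backpack l = backpack_alt l := by
  set f : Int → Int := fun x => (l.count x : Int) with hf
  have hl2 : backpackCountsLoop l 0 [] = l.map f := by
    rw [backpackCountsLoop_eq l 0 []]; simp [hf]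
  obtain ⟨m, hm⟩ : ∃ m, PySem.List.max? (l.map f) (fun y => y) = some m := by
    cases hmx : PySem.List.max? (l.map f) (fun y => y) with
    | none =>
      exfalso
      have := (PySem.List.max?_eq_none_iff (l.map f) (fun y => y)).mp hmx
      simp [h] at this
    | some m => exact ⟨m, rfl⟩
  have hmmem : m ∈ l.map f := PySem.List.max?_mem hm
  obtain ⟨idx, hidx⟩ : ∃ k, PySem.List.index? (l.map f) m = some k := by
    have hs := (PySem.List.index?_isSome_iff (l.map f) m).mpr hmmem
    cases hI : PySem.List.index? (l.map f) m with
    | none => rw [hI] at hs; simp at hs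
    | some k => exact ⟨k, rfl⟩
  obtain ⟨hk, hkv, hkfirst⟩ := PySem.List.getElem_of_index?_eq_some hidx
  have hkl : idx < l.length := by simpa using hk
  have hget : PySem.List.pyGet? l (idx : Int) = some (l[idx]'hkl) := by
    rw [PySem.List.pyGet?_natCast]
    exact List.getElem?_eq_getElem hkl
  have hfe : f (l[idx]'hkl) = m := by simpa using hkv
  have hmax : ∀ y ∈ l, f y ≤ m := by
    intro y hy
    exact PySem.List.max?_isMax hm (f y) (List.mem_map_of_mem hy)
  have hFMa : FirstMax f l (l[idx]'hkl) := by
    refine ⟨fun y hy => hfe ▸ hmax y hy, l.take idx, l.drop (idx + 1), ?_, ?_⟩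
    · conv_lhs => rw [← List.take_append_drop idx l, List.drop_eq_getElem_cons hkl]
    · intro y hy
      obtain ⟨j, hj, hjy⟩ := List.mem_take_iff_getElem.mp hy
      have hjidx : j < idx := by omega
      have hjl : j < l.length := by omega
      have hne : (l.map f)[j]'(by simpa using hjl) ≠ m := hkfirst j (by simpa using hjidx)
      have hle : f y ≤ m := hmax y (hjy ▸ List.getElem_mem hjl)
      have : f (l[j]'hjl) ≠ m := by simpa using hne
      rw [← hjy, hfe]
      have hle' : f (l[j]'hjl) ≤ m := by rw [hjy]; exact hle
      omega
  have hkey : (fun x => (PySem.Dict.counter l).getD x 0) = f := by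
    funext x
    rw [PySem.Dict.getD_counter, hf]
  obtain ⟨e2, he2⟩ : ∃ e2, PySem.List.max? l f = some e2 := by
    cases hmx : PySem.List.max? l f with
    | none =>
      exfalso
      exact h ((PySem.List.max?_eq_none_iff l f).mp hmx)
    | some e2 => exact ⟨e2, rfl⟩
  have hFMb : FirstMax f l e2 := max?_firstMax he2
  have hee : e2 = l[idx]'hkl := firstMax_unique' hFMb hFMa
  have hmem : (l[idx]'hkl) ∈ l := List.getElem_mem hkl
  have hcA : backpackRemoveLoop (l[idx]'hkl) (m - 1).toNat l = some (bLoop (l[idx]'hkl) l m) :=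
    removeLoop_eq_bLoop (l[idx]'hkl) l m hmem (by rw [← hfe])
  have hrem : (PySem.Dict.counter l).getD (l[idx]'hkl) 0 = m := by
    have hcg := congrFun hkey (l[idx]'hkl)
    rw [hcg]
    exact hfe
  unfold backpack backpack_alt
  simp only [PySem.Dict.foldl_insert_getD_add_one_eq_counter, hkey, hl2, hm, hidx, hget, hcA,
    he2, hee]
  rw [hrem, b_foldl_eq (l[idx]'hkl) l [] m]
  simp

-- ===== VERDICT (by name: the statement is the Claim_ definition above) =====
theorem backpack_spec : Claim_equal_backpack := by
  intro l _ hpre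
  unfold Spec_backpack
  exact main_eq l hpre
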